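-- pv_equiv track=rewrite | github.com/CapitalLJ/CapitalLJ-protein-domain-architecture-network-pdan. | Script/pidan_count.py | map_species_to_da
-- ===== SOURCE A (Python) =====
-- def map_species_to_da(species_proteins, da_compositions):
--     species_to_da = {}
--     for species, proteins in species_proteins.items():
--         species_to_da[species] = []
--         for da, da_proteins in da_compositions.items():
--             if proteins == da_proteins:
--                 species_to_da[species].append(da)
--     return species_to_da
-- ===== SOURCE B (Python) =====
-- def map_species_to_da(species_proteins, da_compositions):
--     # Group species names by their protein composition, then sweep the DA table once,
--     # appending each DA name to the result list of every species in its group.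
--     result = {species: [] for species in species_proteins}
--     groups = {}
--     for species, proteins in species_proteins.items():
--         groups.setdefault(tuple(proteins), []).append(species)
--     for da, da_proteins in da_compositions.items():
--         for species in groups.get(tuple(da_proteins), []):
--             result[species].append(da)
--     return result
-- ===== Notes on version B (the rewrite author's own statement) =====
-- stated objective: faster
-- what changed: Instead of scanning all DA compositions per species, B groups species names by composition in one pass and then sweeps the DA table once, appending each DA to every species in its composition's group.
import Mathlib
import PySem

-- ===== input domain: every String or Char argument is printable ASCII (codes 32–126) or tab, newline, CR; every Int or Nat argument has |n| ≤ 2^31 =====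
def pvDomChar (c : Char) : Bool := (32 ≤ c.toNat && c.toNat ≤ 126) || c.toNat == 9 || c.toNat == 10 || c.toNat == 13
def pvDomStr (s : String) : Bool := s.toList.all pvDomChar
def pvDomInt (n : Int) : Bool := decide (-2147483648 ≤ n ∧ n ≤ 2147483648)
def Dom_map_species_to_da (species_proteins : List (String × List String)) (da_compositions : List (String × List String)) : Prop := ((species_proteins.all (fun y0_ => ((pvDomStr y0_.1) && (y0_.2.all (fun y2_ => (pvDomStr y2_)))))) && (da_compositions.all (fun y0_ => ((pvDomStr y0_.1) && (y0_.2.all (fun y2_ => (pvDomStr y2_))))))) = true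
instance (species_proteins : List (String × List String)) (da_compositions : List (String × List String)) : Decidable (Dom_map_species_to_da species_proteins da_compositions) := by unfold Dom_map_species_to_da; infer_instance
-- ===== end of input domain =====

-- B groups species by composition once and sweeps the DA table a single time, instead of scanning every DA composition per species (objective: faster).

-- ===== PORT A =====
-- Transliteration of A: the dict parameters are realised as PySem.Dict.ofList of the
-- association lists; '.items()' iterates their items in insertion order.
def map_species_to_da (species_proteins : List (String × List String)) (da_compositions : List (String × List String)) : List (String × List String) :=
  ((PySem.Dict.ofList species_proteins).items.foldl
    (fun acc p =>
      (PySem.Dict.ofList da_compositions).items.foldl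
        (fun acc2 q => if p.2 = q.2 then acc2.modify p.1 [] (· ++ [q.1]) else acc2)
        (acc.insert p.1 []))
    PySem.Dict.empty).items

-- ===== PORT B =====
-- Transliteration of Source B: 'result = {species: [] for species in species_proteins}' iterates
-- the dict's keys; 'groups.setdefault(tuple(pr), []).append(sp)' is Dict.modify keyed by the
-- composition; the second loop modifies result at each species of the matching group.
def map_species_to_da_alt (species_proteins : List (String × List String)) (da_compositions : List (String × List String)) : List (String × List String) :=
  let spd := PySem.Dict.ofList species_proteins
  let result0 : PySem.Dict String (List String) :=
    spd.keys.foldl (fun r s => r.insert s []) PySem.Dict.empty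
  let groups : PySem.Dict (List String) (List String) :=
    spd.items.foldl (fun g p => g.modify p.2 [] (· ++ [p.1])) PySem.Dict.empty
  ((PySem.Dict.ofList da_compositions).items.foldl
      (fun r q => (groups.getD q.2 []).foldl (fun r2 s => r2.modify s [] (· ++ [q.1])) r)
      result0).items

-- ===== PRECONDITION & SPEC =====
def Spec_map_species_to_da (species_proteins : List (String × List String)) (da_compositions : List (String × List String)) (out : List (String × List String)) : Prop := out = map_species_to_da_alt species_proteins da_compositions
instance (species_proteins : List (String × List String)) (da_compositions : List (String × List String)) (out : List (String × List String)) : Decidable (Spec_map_species_to_da species_proteins da_compositions out) := by unfold Spec_map_species_to_da; infer_instance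

-- ===== CLAIM (what is proved, stated in full; the proofs are below) =====
def Claim_equal_map_species_to_da : Prop := ∀ (species_proteins : List (String × List String)) (da_compositions : List (String × List String)), Dom_map_species_to_da species_proteins da_compositions → Spec_map_species_to_da species_proteins da_compositions (map_species_to_da species_proteins da_compositions)

-- ===== LEMMAS AND PROOFS =====

-- A's inner loop appends the matching DA names to the freshly inserted slot.
lemma msd_inner_fold (l : List (String × List String)) (d : PySem.Dict String (List String))
    (k : String) (pr v : List String) :
    l.foldl (fun a q => if pr = q.2 then a.modify k [] (· ++ [q.1]) else a) (d.insert k v)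
      = d.insert k (v ++ (l.filter (fun q => pr == q.2)).map (·.1)) := by
  induction l generalizing v with
  | nil => simp
  | cons q rest ih =>
    simp only [List.foldl_cons, List.filter_cons]
    by_cases h : pr = q.2
    · rw [if_pos h]
      have hm : (d.insert k v).modify k [] (· ++ [q.1]) = d.insert k (v ++ [q.1]) := by
        simp [PySem.Dict.modify, PySem.Dict.insert_insert_self]
      rw [hm, ih]
      simp [h]
    · rw [if_neg h, ih]
      simp [h]

-- Characterisation of A's result.
lemma msd_a_items (species_proteins da_compositions : List (String × List String)) :
    map_species_to_da species_proteins da_compositions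
      = (PySem.Dict.ofList species_proteins).items.map
          (fun p => (p.1, (((PySem.Dict.ofList da_compositions).items.filter
              (fun q => p.2 == q.2)).map (·.1)))) := by
  unfold map_species_to_da
  have hstep : (fun (acc : PySem.Dict String (List String)) (p : String × List String) =>
      (PySem.Dict.ofList da_compositions).items.foldl
        (fun acc2 q => if p.2 = q.2 then acc2.modify p.1 [] (· ++ [q.1]) else acc2)
        (acc.insert p.1 []))
      = fun acc p => acc.insert p.1
          (((PySem.Dict.ofList da_compositions).items.filter (fun q => p.2 == q.2)).map (·.1)) := by
    funext acc p
    rw [msd_inner_fold]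
    simp
  rw [hstep]
  rw [PySem.Dict.items_foldl_insert_fresh]
  · simp [PySem.Dict.empty]
  · intro a _
    simp
  · simpa [PySem.Dict.keys] using PySem.Dict.nodup_keys_ofList (ps := species_proteins)

-- B's groups dict: the group of a composition is the species names carrying it, in order.
lemma msd_groups_getD (items : List (String × List String)) (pr : List String) :
    (items.foldl (fun g p => g.modify p.2 [] (· ++ [p.1])) PySem.Dict.empty).getD pr []
      = ((items.filter (fun p => p.2 == pr)).map (·.1)) := by
  have hmap : (items.map (fun p => (p.2, p.1))).foldl
        (fun d x => d.modify x.1 [] (· ++ [x.2])) PySem.Dict.empty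
      = items.foldl (fun g p => g.modify p.2 [] (· ++ [p.1])) PySem.Dict.empty := by
    rw [List.foldl_map]
  rw [← hmap, PySem.Dict.getD_foldl_modify_append]
  simp [List.filter_map, Function.comp_def, List.map_map]

-- B's inner loop over a group appends one copy of the DA name per occurrence of the species.
lemma msd_b_inner (ms : List String) (r : PySem.Dict String (List String)) (s v : String) :
    (ms.foldl (fun r2 x => r2.modify x [] (· ++ [v])) r).getD s []
      = r.getD s [] ++ List.replicate (ms.count s) v := by
  induction ms generalizing r with
  | nil => simp
  | cons x rest ih =>
    simp only [List.foldl_cons]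
    rw [ih, PySem.Dict.getD_modify]
    by_cases h : s = x
    · subst h
      rw [if_pos rfl, List.count_cons_self, List.replicate_succ, List.append_assoc]
      simp
    · rw [if_neg h, List.count_cons_of_ne (fun hh => h hh.symm)]

-- B's outer loop: each species collects, in DA order, the names whose composition matches.
lemma msd_b_outer (l : List (String × List String)) (grp : List String → List String)
    (s : String) (prs : List String)
    (hcount : ∀ pr, (grp pr).count s = if prs == pr then 1 else 0)
    (r : PySem.Dict String (List String)) :
    (l.foldl (fun r q => (grp q.2).foldl (fun r2 x => r2.modify x [] (· ++ [q.1])) r) r).getD s []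
      = r.getD s [] ++ (l.filter (fun q => prs == q.2)).map (·.1) := by
  induction l generalizing r with
  | nil => simp
  | cons q rest ih =>
    simp only [List.foldl_cons, List.filter_cons]
    rw [ih, msd_b_inner, hcount]
    by_cases h : prs == q.2
    · rw [if_pos h, h]
      simp [List.append_assoc]
    · rw [if_neg (by simpa using h)]
      simp [h]

-- keys are preserved by B's sweeping loop: every modified key already belongs to the dict.
lemma msd_b_keys (l : List (String × List String)) (grp : List String → List String)
    (r : PySem.Dict String (List String))
    (hsub : ∀ pr, ∀ x ∈ grp pr, x ∈ r.keys) :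
    (l.foldl (fun r q => (grp q.2).foldl (fun r2 x => r2.modify x [] (· ++ [q.1])) r) r).keys
      = r.keys := by
  induction l generalizing r with
  | nil => rfl
  | cons q rest ih =>
    simp only [List.foldl_cons]
    have hk : ((grp q.2).foldl (fun r2 x => r2.modify x [] (· ++ [q.1])) r).keys = r.keys := by
      have := PySem.Dict.keys_foldl_modify (l := grp q.2) (d0 := ([] : List String))
        (f := fun _ _ => (· ++ [q.1])) (d := r)
      rw [this, PySem.Set.update_eq_append_filter]
      have : ((PySem.Set.ofList (grp q.2)).filter
          (fun y => !(PySem.Set.contains r.keys y))) = [] := by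
        apply List.filter_eq_nil_iff.mpr
        intro x hx
        have hx' : x ∈ grp q.2 := (PySem.Set.mem_ofList _ _).1 hx
        simp [PySem.Set.contains_eq_listContains, hsub _ _ hx']
      rw [this, List.append_nil]
    rw [ih _ (by intro pr x hx; rw [hk]; exact hsub pr x hx), hk]

-- ===== VERDICT (by name: the statement is the Claim_ definition above) =====
theorem map_species_to_da_spec : Claim_equal_map_species_to_da := by
  intro species_proteins da_compositions _
  unfold Spec_map_species_to_da
  rw [msd_a_items]
  set spd := PySem.Dict.ofList species_proteins with hspd
  set daI := (PySem.Dict.ofList da_compositions).items with hdaI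
  have hnodup : spd.keys.Nodup := PySem.Dict.nodup_keys_ofList (ps := species_proteins)
  set result0 : PySem.Dict String (List String) :=
    spd.keys.foldl (fun r s => r.insert s ([] : List String)) PySem.Dict.empty with hr0
  set grp : List String → List String :=
    fun pr => ((spd.items.filter (fun p => p.2 == pr)).map (·.1)) with hgrpdef
  have halt : map_species_to_da_alt species_proteins da_compositions
      = (daI.foldl (fun r q =>
          ((spd.items.foldl (fun g p => g.modify p.2 [] (· ++ [p.1]))
              PySem.Dict.empty).getD q.2 []).foldl
            (fun r2 x => r2.modify x [] (· ++ [q.1])) r) result0).items := rfl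
  have hfun : (fun (r : PySem.Dict String (List String)) (q : String × List String) =>
      ((spd.items.foldl (fun g p => g.modify p.2 [] (· ++ [p.1]))
        PySem.Dict.empty).getD q.2 []).foldl (fun r2 x => r2.modify x [] (· ++ [q.1])) r)
      = fun r q => (grp q.2).foldl (fun r2 x => r2.modify x [] (· ++ [q.1])) r := by
    funext r q
    rw [msd_groups_getD]
  rw [halt, hfun]
  have hres0 : result0.items = spd.keys.map (fun s => (s, ([] : List String))) := by
    have := PySem.Dict.items_foldl_insert_fresh (l := spd.keys) (k := id)
      (v := fun _ => ([] : List String)) (d := (PySem.Dict.empty : PySem.Dict String (List String)))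
      (by intro a _; simp) (by simpa using hnodup)
    simpa [PySem.Dict.empty] using this
  have hres0keys : result0.keys = spd.keys := by
    rw [hr0, PySem.Dict.keys_foldl_insert, PySem.Dict.keys_empty,
      PySem.Set.update_nil_left, PySem.Set.ofList_eq_self_of_nodup _ hnodup]
  have hnodup0 : result0.keys.Nodup := by rw [hres0keys]; exact hnodup
  have hgrpsub : ∀ pr, ∀ x ∈ grp pr, x ∈ spd.keys := by
    intro pr x hx
    rcases List.mem_map.1 hx with ⟨p, hp, rfl⟩
    exact List.mem_map.2 ⟨p, List.mem_of_mem_filter hp, rfl⟩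
  set final := daI.foldl
      (fun r q => (grp q.2).foldl (fun r2 x => r2.modify x [] (· ++ [q.1])) r) result0 with hfin
  have hkeys : final.keys = spd.keys := by
    rw [hfin, msd_b_keys daI grp result0 (by intro pr x hx; rw [hres0keys]; exact hgrpsub pr x hx)]
    exact hres0keys
  have hgoal : final.items
      = spd.keys.map (fun s => (s, ((daI.filter (fun q => spd.getD s [] == q.2)).map (·.1)))) := by
    rw [PySem.Dict.items_eq_map_keys final (by rw [hkeys]; exact hnodup) [], hkeys]
    apply List.map_congr_left
    intro s hs
    rcases List.mem_map.1 (show s ∈ spd.items.map (·.1) from hs) with ⟨p, hp, hps⟩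
    have hget : spd.get? s = some p.2 := by
      rw [← hps]
      exact PySem.Dict.get?_of_mem_items spd (by simpa using hp) hnodup
    have hgetD : spd.getD s [] = p.2 := by rw [PySem.Dict.getD_eq_get?_getD, hget]; rfl
    have hnodgrp : ∀ pr, (grp pr).Nodup := by
      intro pr
      exact (List.Sublist.map (fun (p : String × List String) => p.1)
        List.filter_sublist).nodup hnodup
    have hcount : ∀ pr, (grp pr).count s = if p.2 == pr then 1 else 0 := by
      intro pr
      by_cases h : p.2 = pr
      · rw [if_pos (by simp [h])]
        apply List.count_eq_one_of_mem (hnodgrp pr)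
        exact List.mem_map.2 ⟨p, List.mem_filter.2 ⟨hp, by simp [h]⟩, hps⟩
      · rw [if_neg (by simpa using h)]
        apply List.count_eq_zero.2
        intro hmem
        rcases List.mem_map.1 hmem with ⟨p', hp', hp's⟩
        have hfil := List.mem_filter.1 hp'
        have hget' : spd.get? s = some p'.2 := by
          rw [← hp's]
          exact PySem.Dict.get?_of_mem_items spd (by simpa using hfil.1) hnodup
        rw [hget] at hget'
        exact h ((Option.some_inj.1 hget').trans (by simpa using hfil.2))
    have hres0getD : result0.getD s [] = [] := by
      apply PySem.Dict.getD_of_mem_items result0 _ hnodup0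
      rw [hres0]
      exact List.mem_map.2 ⟨s, hs, rfl⟩
    rw [hfin, msd_b_outer daI grp s p.2 hcount result0, hres0getD, hgetD]
    simp
  rw [hgoal, PySem.Dict.items_eq_map_keys spd hnodup [], List.map_map]
  rfl
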